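-- pv_equiv track=rewrite | github.com/LukasAnell/AoC | Python/2016/day9.py | decompressedExtra
-- ===== SOURCE A (Python) =====
-- def decompressedExtra(line):
--     decompressedLength = 0
--     i = 0
--     while i < len(line):
--         if line[i] == '(':
--             i += 1
--             marker = ""
--             while line[i] != ')':
--                 marker += line[i]
--                 i += 1
--             i += 1
--             marker = marker.split('x')
--             sub_length = int(marker[0])
--             repeat = int(marker[1])
--             decompressedLength += repeat * decompressedExtra(line[i:i + sub_length])
--             i += sub_length
--         else:
--             decompressedLength += 1
--             i += 1
--     return decompressedLength
-- ===== SOURCE B (Python) =====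
-- def decompressedExtra(line):
--     # Backward dynamic programming: L[i] = fully-decompressed length of line[i:],
--     # filled in one right-to-left pass with table lookups instead of recursive slicing.
--     n = len(line)
--     L = [0] * (n + 1)
--     for i in range(n - 1, -1, -1):
--         if line[i] == '(':
--             j = line.index(')', i + 1)
--             parts = line[i + 1:j].split('x')
--             sub = int(parts[0])
--             rep = int(parts[1])
--             k = min(j + 1 + sub, n)
--             L[i] = rep * (L[j + 1] - L[k]) + L[k]
--         else:
--             L[i] = 1 + L[i + 1]
--     return L[0]
-- ===== Notes on version B (the rewrite author's own statement) =====
-- stated objective: alternative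
-- what changed: A recursively re-slices and re-scans the span of every marker; B does one right-to-left pass filling a table L[i] = decompressed length of line[i:], computing each marker entry as rep*(L[j+1]-L[k])+L[k] from already-filled table cells, with no recursion and no slicing.
-- outside the precondition, e.g. on decompressedExtra('(6x2)(9x3)ab'): A returns 7, B returns 11; on decompressedExtra('(-1x2)'): A returns 1, B returns -1
import Mathlib
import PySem

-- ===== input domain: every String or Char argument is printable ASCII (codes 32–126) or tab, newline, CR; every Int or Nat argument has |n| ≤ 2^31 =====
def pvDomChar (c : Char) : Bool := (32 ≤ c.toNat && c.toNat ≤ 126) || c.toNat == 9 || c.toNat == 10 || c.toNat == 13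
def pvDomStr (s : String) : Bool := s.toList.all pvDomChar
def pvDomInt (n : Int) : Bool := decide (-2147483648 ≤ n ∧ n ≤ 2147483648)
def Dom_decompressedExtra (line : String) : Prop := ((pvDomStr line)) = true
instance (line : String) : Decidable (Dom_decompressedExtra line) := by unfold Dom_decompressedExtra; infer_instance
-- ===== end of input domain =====

-- B replaces A's recursive slice-and-rescan decompression with one right-to-left table
-- pass (L[i] = decompressed length of line[i:]); equivalence is proved on well-formed
-- marker strings (Pre_), outside which A raises or its truncation/negative-length
-- behaviour is accidental.

-- ===== PORT A =====
-- shared transliteration of the marker-number lines both Pythons contain verbatim: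
-- parts = <marker>.split('x'); sub = int(parts[0]); rep = int(parts[1])
-- (none = one of those lines raises: too few parts or int() ValueError)
def pvMarker (mk : List Char) : Option (Int × Int) :=
  let parts := PySem.Chars.splitOn mk ['x']
  match PySem.List.pyGet? parts 0, PySem.List.pyGet? parts 1 with
  | some p0, some p1 =>
    match PySem.Int.ofChars? p0, PySem.Int.ofChars? p1 with
    | some sub, some rep => some (sub, rep)
    | _, _ => none
  | _, _ => none

-- A's inner `while line[i] != ')': marker += line[i]; i += 1` (falling off the end,
-- where Python raises IndexError, lies outside Pre_)
def pvCollect (l : List Char) (i : Nat) : List Char :=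
  if h : i < l.length then
    if l[i] = ')' then [] else l[i] :: pvCollect l (i + 1)
  else []
termination_by l.length - i

-- A's outer while-loop; i and the accumulator as in A; fuel only makes the Lean
-- function total (inside Pre_ the fuel passed below never runs out, see the proofs)
def pvLoopA (fuel : Nat) (l : List Char) (i : Nat) (acc : Int) : Int :=
  match fuel with
  | 0 => acc
  | f + 1 =>
    if h : i < l.length then
      if l[i] = '(' then
        let mk := pvCollect l (i + 1)
        let i2 := i + 1 + mk.length + 1          -- i after consuming the marker and ')'
        match pvMarker mk with
        | some (sub, rep) =>
            -- line[i:i+sub] ; sub ≥ 0 inside Pre_, so drop/take is Python's slice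
            let slice := (l.drop i2).take sub.toNat
            pvLoopA f l (i2 + sub.toNat) (acc + rep * pvLoopA f slice 0 0)
        | none => acc                            -- Python raises here (outside Pre_)
      else pvLoopA f l (i + 1) (acc + 1)
    else acc

def decompressedExtra (line : String) : Int :=
  pvLoopA (line.toList.length + 1) line.toList 0 0

-- ===== PORT B =====
-- value of table cell L[i] from the char at i, the rest of the string cs = line[i+1:],
-- and T = the already-computed cells [L[i+1], …, L[n]]
def pvVal (c : Char) (cs : List Char) (T : List Int) : Int :=
  if c = '(' then
    let mk := cs.takeWhile (fun ch => ch ≠ ')')  -- line[i+1 : line.index(')', i+1)]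
    if mk.length < cs.length then                -- ')' found (else Python raises)
      match pvMarker mk with
      | some (sub, rep) =>
          let p := mk.length + 1                 -- (j+1) - (i+1) : cell index of L[j+1]
          let k := min (p + sub.toNat) cs.length -- min(j+1+sub, n) - (i+1)
          rep * (T.getD p 0 - T.getD k 0) + T.getD k 0
      | none => 0                                -- Python raises here (outside Pre_)
    else 0
  else 1 + T.headD 0                             -- L[i] = 1 + L[i+1]

-- the right-to-left fill: pvBuildT (line[i:]) = [L[i], …, L[n]]
def pvBuildT : List Char → List Int
  | [] => [0]
  | c :: cs => pvVal c cs (pvBuildT cs) :: pvBuildT cs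

def decompressedExtra_alt (line : String) : Int :=
  (pvBuildT line.toList).headD 0

-- ===== PRECONDITION & SPEC =====
-- Pre_: well-formed marker strings — every '(' starts '<int>x<int>…)' (split-on-'x'
-- parts 0 and 1 parse as ints), with length sub ≥ 0 and the marker's span lying fully
-- inside the string, recursively inside spans.  It excludes (a) inputs where A raises
-- (unclosed or unparseable markers), and (b) inputs A returns on whose value is an
-- accident of A's implementation: negative marker lengths (i jumps backwards) and
-- markers whose span is cut off by the string end or an enclosing span (silent slice
-- truncation) — see the cites in the claim.
def pvWfAux : Nat → List Char → Bool
  | 0, _ => false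
  | _ + 1, [] => true
  | f + 1, c :: cs =>
    if c = '(' then
      let mk := cs.takeWhile (fun ch => ch ≠ ')')
      if mk.length < cs.length then
        match pvMarker mk with
        | some (sub, rep) =>
            let rest := cs.drop (mk.length + 1)
            decide (0 ≤ sub) && decide (sub.toNat ≤ rest.length)
              && pvWfAux f (rest.take sub.toNat) && pvWfAux f (rest.drop sub.toNat)
        | none => false
      else false
    else pvWfAux f cs

def pvWf (cs : List Char) : Bool := pvWfAux (cs.length + 1) cs

def Pre_decompressedExtra (line : String) : Prop := pvWf line.toList = true
instance (line : String) : Decidable (Pre_decompressedExtra line) := by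
  unfold Pre_decompressedExtra; infer_instance

def pvWitness_decompressedExtra : String := "ab(2x3)cd"

def Spec_decompressedExtra (line : String) (out : Int) : Prop := out = decompressedExtra_alt line
instance (line : String) (out : Int) : Decidable (Spec_decompressedExtra line out) := by
  unfold Spec_decompressedExtra; infer_instance

-- ===== CLAIM (what is proved, stated in full; the proofs are below) =====
def Claim_equal_decompressedExtra : Prop := ∀ (line : String), Dom_decompressedExtra line → Pre_decompressedExtra line → Spec_decompressedExtra line (decompressedExtra line)

-- ===== LEMMAS AND PROOFS =====

-- the reference value: recursive decompressed length, structured like pvWf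
def pvDE : List Char → Int
  | [] => 0
  | c :: cs =>
    if c = '(' then
      let mk := cs.takeWhile (fun ch => ch ≠ ')')
      if mk.length < cs.length then
        match pvMarker mk with
        | some (sub, rep) =>
            let rest := cs.drop (mk.length + 1)
            rep * pvDE (rest.take sub.toNat) + pvDE (rest.drop sub.toNat)
        | none => 0
      else 0
    else 1 + pvDE cs
termination_by l => l.length
decreasing_by
  · simp only [List.length_take, List.length_drop, List.length_cons]; omega
  · simp only [List.length_drop, List.length_cons]; omega
  · simp

-- proof-only abbreviations: the marker text after a '(' and the string after its ')'
def pvTW (cs : List Char) : List Char := cs.takeWhile (fun ch => ch ≠ ')')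
def pvRest (cs : List Char) : List Char := cs.drop ((pvTW cs).length + 1)

theorem pvTW_def (cs : List Char) : cs.takeWhile (fun ch => ch ≠ ')') = pvTW cs := rfl
theorem pvRest_def (cs : List Char) : cs.drop ((pvTW cs).length + 1) = pvRest cs := rfl

theorem pvWfAux_congr : ∀ (f : Nat), ∀ (g : Nat) (cs : List Char), cs.length < f → cs.length < g →
    pvWfAux f cs = pvWfAux g cs := by
  intro f
  induction f with
  | zero => intro g cs hf hg; omega
  | succ f ih =>
    intro g cs hf hg
    match g, cs with
    | g + 1, [] => rw [pvWfAux, pvWfAux]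
    | g + 1, c :: cs =>
      rw [pvWfAux, pvWfAux]
      by_cases hc : c = '('
      · simp only [hc, if_true]
        by_cases hlt : (cs.takeWhile (fun ch => ch ≠ ')')).length < cs.length
        · rw [if_pos hlt, if_pos hlt]
          cases hm : pvMarker (cs.takeWhile (fun ch => ch ≠ ')')) with
          | none => rfl
          | some pr =>
            obtain ⟨sub, rep⟩ := pr
            simp only [List.length_cons] at hf hg
            have e1 : pvWfAux f ((cs.drop ((cs.takeWhile (fun ch => ch ≠ ')')).length + 1)).take sub.toNat)
                = pvWfAux g ((cs.drop ((cs.takeWhile (fun ch => ch ≠ ')')).length + 1)).take sub.toNat) := by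
              refine ih g _ ?_ ?_ <;>
                (simp only [List.length_take, List.length_drop]; omega)
            have e2 : pvWfAux f ((cs.drop ((cs.takeWhile (fun ch => ch ≠ ')')).length + 1)).drop sub.toNat)
                = pvWfAux g ((cs.drop ((cs.takeWhile (fun ch => ch ≠ ')')).length + 1)).drop sub.toNat) := by
              refine ih g _ ?_ ?_ <;>
                (simp only [List.length_drop]; omega)
            simp only [e1, e2]
        · rw [if_neg hlt, if_neg hlt]
      · simp only [hc, if_false]
        refine ih g cs ?_ ?_ <;> (simp only [List.length_cons] at hf hg; omega)

theorem pvWfAux_eq_pvWf (f : Nat) (cs : List Char) (h : cs.length < f) :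
    pvWfAux f cs = pvWf cs :=
  pvWfAux_congr f (cs.length + 1) cs h (Nat.lt_succ_self _)

theorem pvWf_cons_ne (c : Char) (cs : List Char) (hc : ¬ c = '(') :
    pvWf (c :: cs) = pvWf cs := by
  rw [pvWf, pvWfAux]
  simp only [hc, if_false]
  exact pvWfAux_eq_pvWf _ _ (by simp)

theorem pvWf_paren_elim (cs : List Char) (h : pvWf ('(' :: cs) = true) :
    ∃ sub rep, (pvTW cs).length < cs.length ∧ pvMarker (pvTW cs) = some (sub, rep) ∧
      0 ≤ sub ∧ sub.toNat ≤ (pvRest cs).length ∧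
      pvWf ((pvRest cs).take sub.toNat) = true ∧
      pvWf ((pvRest cs).drop sub.toNat) = true := by
  rw [pvWf, pvWfAux] at h
  simp only [if_true] at h
  rw [pvTW_def, pvRest_def] at h
  by_cases hlt : (pvTW cs).length < cs.length
  · rw [if_pos hlt] at h
    cases hm : pvMarker (pvTW cs) with
    | none => rw [hm] at h; cases h
    | some pr =>
      obtain ⟨sub, rep⟩ := pr
      rw [hm] at h
      simp only [Bool.and_eq_true, decide_eq_true_eq] at h
      obtain ⟨⟨⟨h1, h2⟩, h3⟩, h4⟩ := h
      have hrl : (pvRest cs).length = cs.length - ((pvTW cs).length + 1) := by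
        unfold pvRest; rw [List.length_drop]
      rw [pvWfAux_eq_pvWf _ _ (by
        rw [List.length_take, Nat.min_eq_left h2]
        simp only [List.length_cons]; omega)] at h3
      rw [pvWfAux_eq_pvWf _ _ (by
        simp only [List.length_drop, List.length_cons]; omega)] at h4
      exact ⟨sub, rep, hlt, rfl, h1, h2, h3, h4⟩
  · rw [if_neg hlt] at h; cases h

theorem pvWf_paren_intro (cs : List Char) (sub rep : Int)
    (hlt : (pvTW cs).length < cs.length) (hm : pvMarker (pvTW cs) = some (sub, rep))
    (h1 : 0 ≤ sub) (h2 : sub.toNat ≤ (pvRest cs).length)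
    (h3 : pvWf ((pvRest cs).take sub.toNat) = true)
    (h4 : pvWf ((pvRest cs).drop sub.toNat) = true) :
    pvWf ('(' :: cs) = true := by
  have hrl : (pvRest cs).length = cs.length - ((pvTW cs).length + 1) := by
    unfold pvRest; rw [List.length_drop]
  rw [pvWf, pvWfAux]
  simp only [if_true]
  rw [pvTW_def, pvRest_def, if_pos hlt, hm]
  simp only [Bool.and_eq_true, decide_eq_true_eq]
  refine ⟨⟨⟨h1, h2⟩, ?_⟩, ?_⟩
  · rw [pvWfAux_eq_pvWf _ _ (by
      rw [List.length_take, Nat.min_eq_left h2]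
      simp only [List.length_cons]; omega)]
    exact h3
  · rw [pvWfAux_eq_pvWf _ _ (by
      simp only [List.length_drop, List.length_cons]; omega)]
    exact h4

theorem pvDE_nil : pvDE [] = 0 := by rw [pvDE]

theorem pvDE_cons_ne (c : Char) (cs : List Char) (hc : ¬ c = '(') :
    pvDE (c :: cs) = 1 + pvDE cs := by
  rw [pvDE]; simp [hc]

theorem pvDE_paren (cs : List Char) (sub rep : Int)
    (hlt : (pvTW cs).length < cs.length) (hm : pvMarker (pvTW cs) = some (sub, rep)) :
    pvDE ('(' :: cs) =
      rep * pvDE ((pvRest cs).take sub.toNat) + pvDE ((pvRest cs).drop sub.toNat) := by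
  rw [pvDE]
  simp only [if_true]
  rw [pvTW_def, pvRest_def, if_pos hlt, hm]

theorem pvVal_ne (c : Char) (cs : List Char) (T : List Int) (hc : ¬ c = '(') :
    pvVal c cs T = 1 + T.headD 0 := by
  rw [pvVal]; simp [hc]

theorem pvVal_paren (cs : List Char) (T : List Int) (sub rep : Int)
    (hlt : (pvTW cs).length < cs.length) (hm : pvMarker (pvTW cs) = some (sub, rep)) :
    pvVal '(' cs T =
      rep * (T.getD ((pvTW cs).length + 1) 0 -
             T.getD (min ((pvTW cs).length + 1 + sub.toNat) cs.length) 0) +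
        T.getD (min ((pvTW cs).length + 1 + sub.toNat) cs.length) 0 := by
  rw [pvVal]
  simp only [if_true]
  rw [pvTW_def, if_pos hlt, hm]

theorem pv_tw_append (X Y : List Char) (p : Char → Bool)
    (h : (X.takeWhile p).length < X.length) :
    (X ++ Y).takeWhile p = X.takeWhile p := by
  induction X with
  | nil => simp at h
  | cons a X ih =>
    by_cases hp : p a
    · simp only [List.takeWhile_cons, hp, if_true, List.cons_append, List.length_cons] at h ⊢
      rw [ih (by omega)]
    · simp [List.takeWhile_cons, hp]

theorem pv_collect_eq (l : List Char) (i : Nat) :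
    pvCollect l i = (l.drop i).takeWhile (fun ch => ch ≠ ')') := by
  have key : ∀ n i, l.length - i ≤ n →
      pvCollect l i = (l.drop i).takeWhile (fun ch => ch ≠ ')') := by
    intro n
    induction n with
    | zero =>
      intro i hi
      rw [pvCollect]
      have h1 : ¬ i < l.length := by omega
      rw [List.drop_eq_nil_of_le (by omega)]
      simp [h1]
    | succ n ih =>
      intro i hi
      rw [pvCollect]
      by_cases h1 : i < l.length
      · rw [List.drop_eq_getElem_cons h1]
        simp only [h1, dif_pos, List.takeWhile_cons]
        by_cases hc : l[i] = ')'
        · simp [hc]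
        · simp only [hc, if_false, ih (i + 1) (by omega)]
          simp [hc]
      · rw [List.drop_eq_nil_of_le (by omega)]
        simp [h1]
  exact key l.length i (by omega)

theorem pv_wf_append (n : Nat) : ∀ (X Y : List Char), X.length ≤ n →
    pvWf X = true → pvWf Y = true → pvWf (X ++ Y) = true := by
  induction n with
  | zero =>
    intro X Y hlen hwX hwY
    obtain rfl : X = [] := List.length_eq_zero_iff.mp (by omega)
    simpa using hwY
  | succ n ih =>
    intro X Y hlen hwX hwY
    match X with
    | [] => simpa using hwY
    | c :: cs =>
      by_cases hc : c = '('
      · subst hc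
        obtain ⟨sub, rep, hlt, hm, h1, h2, h3, h4⟩ := pvWf_paren_elim cs hwX
        have htw : pvTW (cs ++ Y) = pvTW cs := by
          unfold pvTW; exact pv_tw_append cs Y _ hlt
        have hrest : pvRest (cs ++ Y) = pvRest cs ++ Y := by
          unfold pvRest
          rw [htw]
          exact List.drop_append_of_le_length (by omega)
        apply pvWf_paren_intro (cs ++ Y) sub rep
        · rw [htw]; simp only [List.length_append]; omega
        · rw [htw]; exact hm
        · exact h1
        · rw [hrest]; simp only [List.length_append]; omega
        · rw [hrest, List.take_append_of_le_length h2]; exact h3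
        · rw [hrest, List.drop_append_of_le_length h2]
          refine ih _ Y ?_ h4 hwY
          have hr : (pvRest cs).length = cs.length - ((pvTW cs).length + 1) := by
            unfold pvRest; simp
          simp only [List.length_drop]
          simp only [List.length_cons] at hlen
          omega
      · rw [List.cons_append, pvWf_cons_ne c _ hc]
        rw [pvWf_cons_ne c _ hc] at hwX
        refine ih cs Y ?_ hwX hwY
        simp only [List.length_cons] at hlen
        omega

theorem pv_de_append (n : Nat) : ∀ (X Y : List Char), X.length ≤ n →
    pvWf X = true → pvDE (X ++ Y) = pvDE X + pvDE Y := by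
  induction n with
  | zero =>
    intro X Y hlen hwX
    obtain rfl : X = [] := List.length_eq_zero_iff.mp (by omega)
    rw [pvDE_nil]; simp
  | succ n ih =>
    intro X Y hlen hwX
    match X with
    | [] => rw [pvDE_nil]; simp
    | c :: cs =>
      by_cases hc : c = '('
      · subst hc
        obtain ⟨sub, rep, hlt, hm, h1, h2, h3, h4⟩ := pvWf_paren_elim cs hwX
        have htw : pvTW (cs ++ Y) = pvTW cs := by
          unfold pvTW; exact pv_tw_append cs Y _ hlt
        have hrest : pvRest (cs ++ Y) = pvRest cs ++ Y := by
          unfold pvRest; rw [htw]; exact List.drop_append_of_le_length (by omega)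
        rw [List.cons_append]
        rw [pvDE_paren (cs ++ Y) sub rep
              (by rw [htw]; simp only [List.length_append]; omega) (by rw [htw]; exact hm)]
        rw [hrest, List.take_append_of_le_length h2, List.drop_append_of_le_length h2]
        rw [pvDE_paren cs sub rep hlt hm]
        have hihd : pvDE ((pvRest cs).drop sub.toNat ++ Y)
            = pvDE ((pvRest cs).drop sub.toNat) + pvDE Y := by
          refine ih _ Y ?_ h4
          have hr : (pvRest cs).length = cs.length - ((pvTW cs).length + 1) := by
            unfold pvRest; simp
          simp only [List.length_drop]
          simp only [List.length_cons] at hlen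
          omega
        rw [hihd]; ring
      · rw [List.cons_append, pvDE_cons_ne c _ hc, pvDE_cons_ne c _ hc]
        rw [pvWf_cons_ne c _ hc] at hwX
        rw [ih cs Y (by simp only [List.length_cons] at hlen; omega) hwX]
        ring

theorem pv_buildT_getD (cs : List Char) (p : Nat) (hp : p ≤ cs.length) :
    (pvBuildT cs).getD p 0 = (pvBuildT (cs.drop p)).headD 0 := by
  induction cs generalizing p with
  | nil =>
    obtain rfl : p = 0 := by simpa using hp
    simp [pvBuildT]
  | cons c cs ih =>
    cases p with
    | zero => simp [pvBuildT]
    | succ p =>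
      simp only [pvBuildT, List.getD_cons_succ, List.drop_succ_cons]
      exact ih p (by simpa using hp)

theorem pv_loopA_correct (fuel : Nat) : ∀ (l : List Char) (i : Nat) (acc : Int),
    pvWf (l.drop i) = true → l.length - i < fuel →
    pvLoopA fuel l i acc = acc + pvDE (l.drop i) := by
  induction fuel with
  | zero => intro l i acc hw hfu; omega
  | succ f ih =>
    intro l i acc hw hfu
    rw [pvLoopA]
    by_cases hi : i < l.length
    · have hdrop : l.drop i = l[i] :: l.drop (i + 1) := List.drop_eq_getElem_cons hi
      rw [dif_pos hi]
      by_cases hc : l[i] = '('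
      · rw [if_pos hc]
        rw [hdrop, hc] at hw
        obtain ⟨sub, rep, hlt, hm, h1, h2, h3, h4⟩ := pvWf_paren_elim _ hw
        simp only [pv_collect_eq l (i + 1), pvTW_def, hm]
        have hlen_cs : (l.drop (i + 1)).length = l.length - (i + 1) := by simp
        have hrlen : (pvRest (l.drop (i + 1))).length
            = (l.drop (i + 1)).length - ((pvTW (l.drop (i + 1))).length + 1) := by
          unfold pvRest; rw [List.length_drop]
        have hd2 : l.drop (i + 1 + (pvTW (l.drop (i + 1))).length + 1)
            = pvRest (l.drop (i + 1)) := by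
          unfold pvRest
          rw [List.drop_drop]
          congr 1
        rw [hd2]
        have hinner : pvLoopA f ((pvRest (l.drop (i + 1))).take sub.toNat) 0 0
            = 0 + pvDE (((pvRest (l.drop (i + 1))).take sub.toNat).drop 0) := by
          refine ih _ 0 0 ?_ ?_
          · simpa using h3
          · rw [List.length_take, Nat.min_eq_left h2]
            omega
        rw [hinner]
        have hd3 : l.drop (i + 1 + (pvTW (l.drop (i + 1))).length + 1 + sub.toNat)
            = (pvRest (l.drop (i + 1))).drop sub.toNat := by
          rw [← hd2, List.drop_drop]
        have houter : pvLoopA f l (i + 1 + (pvTW (l.drop (i + 1))).length + 1 + sub.toNat)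
              (acc + rep * (0 + pvDE (((pvRest (l.drop (i + 1))).take sub.toNat).drop 0)))
            = (acc + rep * (0 + pvDE (((pvRest (l.drop (i + 1))).take sub.toNat).drop 0)))
              + pvDE (l.drop (i + 1 + (pvTW (l.drop (i + 1))).length + 1 + sub.toNat)) := by
          refine ih _ _ _ ?_ ?_
          · rw [hd3]; exact h4
          · omega
        rw [houter, hd3, hdrop, hc, pvDE_paren _ sub rep hlt hm]
        simp only [List.drop_zero]
        ring
      · rw [if_neg hc]
        rw [hdrop] at hw
        rw [pvWf_cons_ne _ _ hc] at hw
        rw [ih l (i + 1) (acc + 1) hw (by omega)]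
        rw [hdrop, pvDE_cons_ne _ _ hc]
        ring
    · rw [dif_neg hi]
      rw [List.drop_eq_nil_of_le (by omega), pvDE_nil]
      ring

theorem pv_buildT_correct (n : Nat) : ∀ (cs : List Char), cs.length ≤ n →
    pvWf cs = true → (pvBuildT cs).headD 0 = pvDE cs := by
  induction n with
  | zero =>
    intro cs hlen hw
    obtain rfl : cs = [] := List.length_eq_zero_iff.mp (by omega)
    simp [pvBuildT, pvDE_nil]
  | succ n ih =>
    intro cs hlen hw
    match cs with
    | [] => simp [pvBuildT, pvDE_nil]
    | c :: cs =>
      simp only [pvBuildT, List.headD_cons]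
      by_cases hc : c = '('
      · subst hc
        obtain ⟨sub, rep, hlt, hm, h1, h2, h3, h4⟩ := pvWf_paren_elim cs hw
        rw [pvVal_paren cs _ sub rep hlt hm]
        have hmin : min ((pvTW cs).length + 1 + sub.toNat) cs.length
            = (pvTW cs).length + 1 + sub.toNat := by
          have hr : (pvRest cs).length = cs.length - ((pvTW cs).length + 1) := by
            unfold pvRest; rw [List.length_drop]
          omega
        rw [hmin]
        have hg1 : (pvBuildT cs).getD ((pvTW cs).length + 1) 0
            = (pvBuildT (pvRest cs)).headD 0 := by
          rw [pv_buildT_getD cs _ (by omega)]; rfl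
        have hg2 : (pvBuildT cs).getD ((pvTW cs).length + 1 + sub.toNat) 0
            = (pvBuildT ((pvRest cs).drop sub.toNat)).headD 0 := by
          have hr : (pvRest cs).length = cs.length - ((pvTW cs).length + 1) := by
            unfold pvRest; rw [List.length_drop]
          rw [pv_buildT_getD cs _ (by omega)]
          congr 1
          unfold pvRest
          rw [List.drop_drop]
        have hrlen : (pvRest cs).length = cs.length - ((pvTW cs).length + 1) := by
          unfold pvRest; rw [List.length_drop]
      -- L[j+1] = dE(span) + dE(after): split pvRest cs at sub and use concatenativity
        have hsplit : (pvRest cs).take sub.toNat ++ (pvRest cs).drop sub.toNat = pvRest cs :=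
          List.take_append_drop _ _
        have hwrest : pvWf (pvRest cs) = true := by
          rw [← hsplit]
          refine pv_wf_append n _ _ ?_ h3 h4
          rw [List.length_take, Nat.min_eq_left h2]
          simp only [List.length_cons] at hlen
          omega
        have hrest_de : (pvBuildT (pvRest cs)).headD 0 = pvDE (pvRest cs) := by
          refine ih _ ?_ hwrest
          simp only [List.length_cons] at hlen
          omega
        have hrest_split : pvDE (pvRest cs)
            = pvDE ((pvRest cs).take sub.toNat) + pvDE ((pvRest cs).drop sub.toNat) := by
          conv_lhs => rw [← hsplit]
          refine pv_de_append n _ _ ?_ h3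
          rw [List.length_take, Nat.min_eq_left h2]
          simp only [List.length_cons] at hlen
          omega
        have hdrop_de : (pvBuildT ((pvRest cs).drop sub.toNat)).headD 0
            = pvDE ((pvRest cs).drop sub.toNat) := by
          refine ih _ ?_ h4
          simp only [List.length_drop, List.length_cons] at hlen ⊢
          omega
        rw [hg1, hg2, hrest_de, hdrop_de, hrest_split,
          pvDE_paren cs sub rep hlt hm]
        ring
      · rw [pvVal_ne c cs _ hc]
        rw [pvWf_cons_ne c cs hc] at hw
        have hh : (pvBuildT cs).headD 0 = pvDE cs := by
          refine ih cs ?_ hw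
          simp only [List.length_cons] at hlen
          omega
        rw [hh, pvDE_cons_ne c cs hc]

-- ===== VERDICT (by name: the statement is the Claim_ definition above) =====
theorem decompressedExtra_spec : Claim_equal_decompressedExtra := by
  intro line _ hpre
  unfold Spec_decompressedExtra decompressedExtra decompressedExtra_alt
  have hA := pv_loopA_correct (line.toList.length + 1) line.toList 0 0
      (by simpa using hpre) (by omega)
  have hB := pv_buildT_correct line.toList.length line.toList le_rfl hpre
  simp only [List.drop_zero] at hA
  omega
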